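-- pv_equiv track=rewrite | github.com/PolySeguim/python-i-workbook-25-26-lions-Allison10000 | 2ndtest.py | question20corrected
-- ===== SOURCE A (Python) =====
-- def question20corrected(userinputlist):
--     newlist = []
--     for i in userinputlist:
--         if i == 0:
--             return newlist
--         else:
--             newlist.append(i)
--     return newlist
-- ===== SOURCE B (Python) =====
-- def question20corrected(userinputlist):
--     try:
--         return userinputlist[:userinputlist.index(0)]
--     except ValueError:
--         return list(userinputlist)
-- ===== Notes on version B (the rewrite author's own statement) =====
-- stated objective: simpler
-- what changed: Replaces the element-by-element append loop with find-the-first-zero (list.index in a try block) followed by a single prefix slice, copying the whole list when no zero is present.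
import Mathlib
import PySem

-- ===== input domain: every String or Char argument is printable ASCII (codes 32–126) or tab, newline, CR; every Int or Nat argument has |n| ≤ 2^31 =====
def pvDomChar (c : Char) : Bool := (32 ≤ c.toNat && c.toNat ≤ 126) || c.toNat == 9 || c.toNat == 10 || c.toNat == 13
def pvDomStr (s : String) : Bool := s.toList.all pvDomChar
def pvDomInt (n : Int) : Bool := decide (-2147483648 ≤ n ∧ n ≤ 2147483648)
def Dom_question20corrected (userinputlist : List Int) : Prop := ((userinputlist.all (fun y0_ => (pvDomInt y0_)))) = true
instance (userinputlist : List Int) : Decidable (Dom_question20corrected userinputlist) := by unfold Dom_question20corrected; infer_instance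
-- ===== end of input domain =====

-- B replaces A's incremental append loop by find-first-zero (index) + one prefix slice; objective: simpler.

-- ===== PORT A =====
-- loop over the list, appending each element to newlist, returning early at the first zero
def question20correctedGo (newlist : List Int) : List Int → List Int
  | [] => newlist
  | i :: rest => if i = 0 then newlist else question20correctedGo (newlist ++ [i]) rest

def question20corrected (userinputlist : List Int) : List Int :=
  question20correctedGo [] userinputlist

-- ===== PORT B =====
def question20corrected_alt (userinputlist : List Int) : List Int :=
  match PySem.List.index? userinputlist 0 with
  | some k => PySem.List.slice userinputlist none (some (k : Int))
  | none => userinputlist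

-- ===== PRECONDITION & SPEC =====
def Spec_question20corrected (userinputlist : List Int) (out : List Int) : Prop := out = question20corrected_alt userinputlist
instance (userinputlist : List Int) (out : List Int) : Decidable (Spec_question20corrected userinputlist out) := by unfold Spec_question20corrected; infer_instance

-- ===== CLAIM (what is proved, stated in full; the proofs are below) =====
def Claim_equal_question20corrected : Prop := ∀ (userinputlist : List Int), Dom_question20corrected userinputlist → Spec_question20corrected userinputlist (question20corrected userinputlist)

-- ===== LEMMAS AND PROOFS =====

theorem question20correctedGo_eq (xs acc : List Int) :
    question20correctedGo acc xs = acc ++ xs.takeWhile (fun i => !(i == 0)) := by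
  induction xs generalizing acc with
  | nil => simp [question20correctedGo]
  | cons i rest ih =>
    simp only [question20correctedGo, List.takeWhile]
    by_cases h : i = 0
    · simp [h]
    · have hb : (i == 0) = false := by simp [h]
      simp [hb, ih, h]

theorem alt_eq_takeWhile (xs : List Int) :
    question20corrected_alt xs = xs.takeWhile (fun i => !(i == 0)) := by
  unfold question20corrected_alt
  rcases h : PySem.List.index? xs 0 with _ | k
  · rw [PySem.List.index?_eq_none_iff] at h
    refine (List.takeWhile_eq_self_iff.mpr ?_).symm
    intro i hi
    simp only [Bool.not_eq_eq_eq_not, Bool.not_true, beq_eq_false_iff_ne]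
    rintro rfl; exact h hi
  · rw [PySem.List.index?_eq_some_iff] at h
    obtain ⟨pre, suf, rfl, rfl, hnot⟩ := h
    dsimp only
    rw [PySem.List.slice_to_natCast]
    rw [List.take_append_of_le_length (by simp)]
    rw [List.take_length]
    rw [List.takeWhile_append]
    have hp : ∀ i ∈ pre, (fun i => !(i == 0)) i = true := by
      intro i hi; simp; rintro rfl; exact hnot hi
    rw [List.takeWhile_eq_self_iff.mpr hp]
    simp [List.takeWhile]

-- ===== VERDICT (by name: the statement is the Claim_ definition above) =====
theorem question20corrected_spec : Claim_equal_question20corrected := by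
  intro xs _
  unfold Spec_question20corrected
  rw [question20corrected, question20correctedGo_eq, alt_eq_takeWhile, List.nil_append]
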